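-- pv_equiv track=rewrite | github.com/aish-bit/Logic_Building_Programs_in_Python | ProblemOnDigits.py | countDigitGreaterFive
-- ===== SOURCE A (Python) =====
-- def countDigitGreaterFive(iNo):
--     # Filter in case of input is zero
--     if(iNo == 0):
--         return -1
--
--     # Initialising local variable
--     iNum   = iNo
--     iDigit = None
--     iCount = 0
--
--     # updater in case of number is negative
--     if(iNo < 0):
--         iNum = -iNo
--
--     #loop to count number >= 5
--     while(iNum != 0):
--         iDigit = iNum % 10
--         if(iDigit >= 5):
--             iCount += 1
--         iNum   = iNum // 10
--
--     # returning result
--     return iCount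
-- ===== SOURCE B (Python) =====
-- def countDigitGreaterFive(iNo):
--     if iNo == 0:
--         return -1
--     return sum(1 for c in str(abs(iNo)) if c >= '5')
-- ===== Notes on version B (the rewrite author's own statement) =====
-- stated objective: idiomatic
-- what changed: B counts digits >= 5 by scanning the decimal string str(abs(iNo)) MSB-to-LSB with a comprehension instead of A's LSB-to-MSB %10,//10 arithmetic loop; the zero guard and abs behaviour are kept.
import Mathlib
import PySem

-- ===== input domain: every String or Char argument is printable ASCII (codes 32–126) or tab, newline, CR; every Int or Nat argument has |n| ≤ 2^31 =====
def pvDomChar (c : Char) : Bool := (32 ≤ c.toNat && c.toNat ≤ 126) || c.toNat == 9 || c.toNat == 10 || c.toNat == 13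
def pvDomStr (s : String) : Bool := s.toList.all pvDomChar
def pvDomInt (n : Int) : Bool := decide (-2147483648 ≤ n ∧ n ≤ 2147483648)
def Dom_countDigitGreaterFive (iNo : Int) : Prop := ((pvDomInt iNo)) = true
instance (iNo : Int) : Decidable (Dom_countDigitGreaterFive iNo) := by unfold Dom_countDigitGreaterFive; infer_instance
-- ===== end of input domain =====

-- B counts digits >= 5 over the decimal string str(abs(iNo)) (MSB→LSB) instead of
-- A's %10 // 10 arithmetic loop (LSB→MSB); same cost, more idiomatic.

-- ===== PORT A =====
-- A's while-loop; iNum is nonnegative at every iteration (A takes -iNo first),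
-- so Python's % 10 and // 10 coincide with Nat.mod / Nat.div here.
def pvALoop (iNum : Nat) (iCount : Int) : Int :=
  if iNum = 0 then iCount
  else
    let iDigit := iNum % 10
    let iCount' := if iDigit ≥ 5 then iCount + 1 else iCount
    pvALoop (iNum / 10) iCount'
decreasing_by exact Nat.div_lt_self (Nat.pos_of_ne_zero (by assumption)) (by omega)

def countDigitGreaterFive (iNo : Int) : Int :=
  if iNo = 0 then -1
  else
    let iNum : Int := if iNo < 0 then -iNo else iNo
    pvALoop iNum.toNat 0

-- ===== PORT B =====
def countDigitGreaterFive_alt (iNo : Int) : Int :=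
  if iNo = 0 then -1
  else ((PySem.Int.toStr |iNo|).toList.countP (fun c => decide ('5' ≤ c)) : Nat)

-- ===== PRECONDITION & SPEC =====
def Spec_countDigitGreaterFive (iNo : Int) (out : Int) : Prop := out = countDigitGreaterFive_alt iNo
instance (iNo : Int) (out : Int) : Decidable (Spec_countDigitGreaterFive iNo out) := by unfold Spec_countDigitGreaterFive; infer_instance

-- ===== CLAIM (what is proved, stated in full; the proofs are below) =====
def Claim_equal_countDigitGreaterFive : Prop := ∀ (iNo : Int), Dom_countDigitGreaterFive iNo → Spec_countDigitGreaterFive iNo (countDigitGreaterFive iNo)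

-- ===== LEMMAS AND PROOFS =====

-- structural form of `Nat.toDigits 10`
def pvNatChars (n : Nat) : List Char :=
  if n < 10 then [Nat.digitChar n]
  else pvNatChars (n / 10) ++ [Nat.digitChar (n % 10)]
decreasing_by exact Nat.div_lt_self (by omega) (by omega)

theorem pvNatChars_large (n : Nat) (h : ¬ n < 10) :
    pvNatChars n = pvNatChars (n / 10) ++ [Nat.digitChar (n % 10)] := by
  rw [pvNatChars]; simp [h]

theorem pvToDigitsCore_eq (f : Nat) : ∀ n l, n < f →
    Nat.toDigitsCore 10 f n l = pvNatChars n ++ l := by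
  induction f with
  | zero => intro n l h; omega
  | succ f ih =>
    intro n l h
    rw [Nat.toDigitsCore]
    by_cases h10 : n < 10
    · have : n / 10 = 0 := Nat.div_eq_of_lt h10
      simp [this, pvNatChars, h10, Nat.mod_eq_of_lt h10]
    · have hne : n / 10 ≠ 0 := by omega
      have hlt : n / 10 < f := by
        have := Nat.div_lt_self (show 0 < n by omega) (show 1 < 10 by omega)
        omega
      simp only [hne, ite_false]
      rw [ih _ _ hlt, pvNatChars_large n h10]
      simp

theorem pvToDigits_eq (n : Nat) : Nat.toDigits 10 n = pvNatChars n := by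
  have := pvToDigitsCore_eq (n + 1) n [] (by omega)
  simpa [Nat.toDigits] using this

theorem pvDigitChar_ge5 (d : Nat) (h : d < 10) :
    (decide ('5' ≤ Nat.digitChar d)) = decide (5 ≤ d) := by
  interval_cases d <;> decide

theorem pvALoop_eq (n : Nat) : ∀ c : Int,
    pvALoop n c = c + ((pvNatChars n).countP (fun ch => decide ('5' ≤ ch)) : Nat) := by
  induction n using Nat.strong_induction_on with
  | _ n ih =>
    intro c
    by_cases h0 : n = 0
    · subst h0
      rw [pvALoop, pvNatChars]
      simp
    · rw [pvALoop]
      simp only [h0]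
      by_cases h10 : n < 10
      · have hfin : pvALoop (n / 10) (if n % 10 ≥ 5 then c + 1 else c)
            = (if n % 10 ≥ 5 then c + 1 else c) := by
          have : n / 10 = 0 := Nat.div_eq_of_lt h10
          rw [this, pvALoop]; simp
        rw [hfin, pvNatChars]
        simp only [if_pos h10, List.countP_cons, List.countP_nil]
        rw [pvDigitChar_ge5 n h10]
        have : n % 10 = n := Nat.mod_eq_of_lt h10
        rw [this]
        by_cases h5 : 5 ≤ n <;> simp [h5]
      · have hlt : n / 10 < n :=
          Nat.div_lt_self (Nat.pos_of_ne_zero h0) (by omega)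
        rw [ih _ hlt, pvNatChars_large n h10]
        simp only [List.countP_append, List.countP_cons, List.countP_nil]
        rw [pvDigitChar_ge5 (n % 10) (Nat.mod_lt _ (by omega))]
        by_cases h5 : 5 ≤ n % 10 <;>
          simp only [h5, decide_true, decide_false, if_true, if_false] <;> push_cast <;> ring

-- ===== VERDICT (by name: the statement is the Claim_ definition above) =====
theorem countDigitGreaterFive_spec : Claim_equal_countDigitGreaterFive := by
  intro iNo _
  unfold Spec_countDigitGreaterFive countDigitGreaterFive countDigitGreaterFive_alt
  by_cases h0 : iNo = 0
  · simp [h0]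
  · simp only [h0]
    have habs : (if iNo < 0 then -iNo else iNo) = |iNo| := by
      split_ifs with h
      · exact (abs_of_neg h).symm
      · exact (abs_of_nonneg (not_lt.mp h)).symm
    rw [habs]
    have hnn : (0:Int) ≤ |iNo| := abs_nonneg _
    have hneg : ¬ |iNo| < 0 := not_lt.mpr hnn
    rw [pvALoop_eq]
    simp only [PySem.Int.toStr, PySem.Int.toChars, if_neg hneg]
    rw [pvToDigits_eq]
    rw [String.toList_ofList]
    simp
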